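-- pv_equiv track=rewrite | github.com/JonathanMeriino/Projects | Schoolar/OperacionesLenguaje/opLenguajes.py | concatenar
-- ===== SOURCE A (Python) =====
-- def concatenar(lenguage1,lenguage2,longitud):
--     nuevo=[]    #cadena auxiliar que almacena todos los valores nuevos
--     for i in lenguage2: # para i en lenguage2
--         cadena=str(lenguage1[0])+i  #cadena almacena lenguaje1 en almacenamiento i
--         nuevo.append(cadena)    #se agrega la cadena a auxiliar nuevo
--     if longitud>1:              # si longitud es mayor a 1
--         longitud=longitud-1     #lomgitud se redue en una unidad
--         lenguage1.remove(lenguage1[0])  #lenguage1 se remueve  la posicion 0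
--         aux=lenguage1               #aux toma valor de lenguage1
--         nuevo=nuevo+concatenar(aux,lenguage2,longitud)      #se hace recursividad
--     return nuevo
-- ===== SOURCE B (Python) =====
-- def concatenar(lenguage1, lenguage2, longitud):
--     # Iterative double loop instead of recursion; same return value and the
--     # same in-place removal of the first longitud-1 elements of lenguage1.
--     n = longitud if longitud > 1 else 1
--     nuevo = [str(lenguage1[k]) + i for k in range(n) for i in lenguage2]
--     del lenguage1[:max(longitud - 1, 0)]
--     return nuevo
-- ===== Notes on version B (the rewrite author's own statement) =====
-- stated objective: faster
-- what changed: Replaces A's recursion-with-mutation (each level reads lenguage1[0], pops the head with remove, and rebuilds nuevo by list concatenation) with a single double-loop comprehension over range(max(longitud,1)) x lenguage2 indexing the original list, plus one slice deletion for the side effect.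
import Mathlib
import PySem

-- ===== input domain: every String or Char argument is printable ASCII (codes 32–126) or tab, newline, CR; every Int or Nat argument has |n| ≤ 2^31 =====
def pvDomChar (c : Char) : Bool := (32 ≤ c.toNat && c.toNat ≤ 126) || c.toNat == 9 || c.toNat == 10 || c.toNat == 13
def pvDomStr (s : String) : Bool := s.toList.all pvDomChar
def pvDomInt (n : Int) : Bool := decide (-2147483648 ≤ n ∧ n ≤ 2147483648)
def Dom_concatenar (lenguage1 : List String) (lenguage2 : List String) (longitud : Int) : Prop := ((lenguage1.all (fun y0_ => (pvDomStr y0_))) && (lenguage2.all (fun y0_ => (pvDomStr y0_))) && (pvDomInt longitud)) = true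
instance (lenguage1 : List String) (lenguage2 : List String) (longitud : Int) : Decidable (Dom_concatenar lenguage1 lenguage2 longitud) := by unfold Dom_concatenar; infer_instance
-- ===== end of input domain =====

-- B replaces A's recursion by a single double-loop comprehension indexing the original list
-- (objective: simpler). Equivalence is about the RETURN value; both A and B also delete the
-- first (longitud-1) elements of lenguage1 in place (B reproduces that side effect in Python).

-- ===== PORT A =====
-- literal port: the for-loop is the foldl, `lenguage1.remove(lenguage1[0])` drops the head
-- (Python raises on an empty list there; Pre_ excludes those inputs, tail [] is never reached).
def concatenar (lenguage1 : List String) (lenguage2 : List String) (longitud : Int) : List String :=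
  let nuevo := lenguage2.foldl
    (fun acc i => acc ++ [((PySem.List.pyGet? lenguage1 0).getD "") ++ i]) []
  if longitud > 1 then
    nuevo ++ concatenar lenguage1.tail lenguage2 (longitud - 1)
  else
    nuevo
termination_by longitud.toNat
decreasing_by omega

-- ===== PORT B =====
-- port of Source B: n = longitud if longitud>1 else 1; double comprehension over range(n) × lenguage2
def concatenar_alt (lenguage1 : List String) (lenguage2 : List String) (longitud : Int) : List String :=
  let n : Int := if longitud > 1 then longitud else 1
  (List.range n.toNat).flatMap (fun (k : Nat) =>
    lenguage2.map (fun i => ((PySem.List.pyGet? lenguage1 (k : Int)).getD "") ++ i))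

-- ===== PRECONDITION & SPEC =====
-- Pre_ excludes exactly the inputs where Python A raises IndexError: with a nonempty
-- lenguage2 it reads lenguage1[0] at max(longitud,1) recursion levels, and with an empty
-- lenguage2 it still pops longitud-1 heads.
def Pre_concatenar (lenguage1 : List String) (lenguage2 : List String) (longitud : Int) : Prop :=
  if lenguage2 = [] then
    longitud ≤ 1 ∨ longitud - 1 ≤ (lenguage1.length : Int)
  else
    (if longitud > 1 then longitud else 1) ≤ (lenguage1.length : Int)
instance (lenguage1 : List String) (lenguage2 : List String) (longitud : Int) : Decidable (Pre_concatenar lenguage1 lenguage2 longitud) := by unfold Pre_concatenar; infer_instance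
def pvWitness_concatenar : List String × List String × Int := (["a", "b"], ["x", "y"], 2)

def Spec_concatenar (lenguage1 : List String) (lenguage2 : List String) (longitud : Int) (out : List String) : Prop := out = concatenar_alt lenguage1 lenguage2 longitud
instance (lenguage1 : List String) (lenguage2 : List String) (longitud : Int) (out : List String) : Decidable (Spec_concatenar lenguage1 lenguage2 longitud out) := by unfold Spec_concatenar; infer_instance

-- ===== CLAIM (what is proved, stated in full; the proofs are below) =====
def Claim_equal_concatenar : Prop := ∀ (lenguage1 : List String) (lenguage2 : List String) (longitud : Int), Dom_concatenar lenguage1 lenguage2 longitud → Pre_concatenar lenguage1 lenguage2 longitud → Spec_concatenar lenguage1 lenguage2 longitud (concatenar lenguage1 lenguage2 longitud)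
-- ===== LEMMAS AND PROOFS =====

-- the append-accumulating foldl of A's for-loop is a map
lemma foldl_app (l : List String) (f : String → String) :
    ∀ acc : List String, l.foldl (fun acc i => acc ++ [f i]) acc = acc ++ l.map f := by
  induction l with
  | nil => simp
  | cons x xs ih => intro acc; simp [List.foldl, ih]

-- with an empty lenguage2, A returns [] at every level
lemma A_nil (l1 : List String) (n : Int) : concatenar l1 [] n = [] := by
  fun_induction concatenar l1 [] n <;> simp_all [List.foldl]

-- characterisation of A on a positive integer level count m ≤ |l1|
lemma A_pos (l2 : List String) : ∀ (m : Nat) (l1 : List String), 1 ≤ m → m ≤ l1.length →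
    concatenar l1 l2 (m : Int) =
      (List.range m).flatMap (fun (k : Nat) =>
        l2.map (fun i => ((PySem.List.pyGet? l1 (k : Int)).getD "") ++ i)) := by
  intro m
  induction m with
  | zero => intro l1 h; omega
  | succ m ih =>
    intro l1 _ hlen
    match m with
    | 0 =>
      rw [concatenar]
      rw [if_neg (by norm_num : ¬ ((0 + 1 : Nat) : Int) > 1)]
      rw [foldl_app, List.nil_append]
      simp [List.range, List.range.loop, PySem.List.pyGet?]
    | Nat.succ m' =>
      obtain ⟨a, t, rfl⟩ : ∃ a t, l1 = a :: t := by
        cases l1 with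
        | nil => simp at hlen
        | cons a t => exact ⟨a, t, rfl⟩
      have hgt : ((m' + 1 + 1 : Nat) : Int) > 1 := by push_cast; omega
      have hcast : ((m' + 1 + 1 : Nat) : Int) - 1 = ((m' + 1 : Nat) : Int) := by push_cast; ring
      have key : ∀ k : Nat, PySem.List.pyGet? (a :: t) ((k + 1 : Nat) : Int) =
          PySem.List.pyGet? t (k : Int) := by
        intro k
        have hc : ((k + 1 : Nat) : Int) = (k : Int) + 1 := by push_cast; ring
        rw [hc, PySem.List.pyGet?_cons_succ]
      rw [List.range_succ_eq_map, List.flatMap_cons, List.flatMap_map]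
      simp only [Nat.succ_eq_add_one, key]
      rw [concatenar, if_pos hgt, hcast, List.tail_cons,
        ih t (by omega) (by simp at hlen ⊢; omega)]
      rw [foldl_app, List.nil_append]
      simp [PySem.List.pyGet?]

-- ===== VERDICT (by name: the statement is the Claim_ definition above) =====
theorem concatenar_spec : Claim_equal_concatenar := by
  intro l1 l2 n _ hpre
  unfold Spec_concatenar concatenar_alt
  by_cases h2 : l2 = []
  · subst h2
    simp [A_nil]
  · rw [Pre_concatenar, if_neg h2] at hpre
    by_cases hn : n > 1
    · rw [if_pos hn] at hpre ⊢
      have hm : n = ((n.toNat : Nat) : Int) := by omega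
      rw [hm]
      exact A_pos l2 n.toNat l1 (by omega) (by omega)
    · rw [if_neg hn] at hpre ⊢
      rw [concatenar, if_neg hn]
      have := A_pos l2 1 l1 (by omega) (by omega)
      rw [concatenar, if_neg (by norm_num : ¬ ((1:Nat):Int) > 1)] at this
      simpa using this
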